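-- pv_equiv track=rewrite | github.com/pnpninja/100daysofcode | src/main/java/edu/stonybrook/pnarendra/solutions/Robinhood_IsSubmatrixFull.py | isSubmatrixFull
-- ===== SOURCE A (Python) =====
-- def isSubmatrixFull(matrix):
--     dict = {}
--     '''Calculate the first 3'''
--     ans = []
--     for i in range(0,3):
--         for j in range(0,3):
--             if not (matrix[j][i] <0 or matrix[j][i] >9):
--                 dict[matrix[j][i]] = 1
--
--     if len(dict) == 9:
--         ans.append(True)
--     else:
--         ans.append(False)
--     for iter in range(1, len(matrix[0]) - 2):
--         dict = {}
--         for i in range(iter,iter + 3):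
--             for j in range(0,3):
--                 if not (matrix[j][i] <0 or matrix[j][i] >9):
--                     dict[matrix[j][i]] = 1
--         if len(dict) == 9:
--             ans.append(True)
--         else:
--             ans.append(False)
--     return ans
-- ===== SOURCE B (Python) =====
-- def isSubmatrixFull(matrix):
--     ncols = len(matrix[0])
--     colsets = []
--     for i in range(ncols):
--         s = set()
--         for j in range(0, 3):
--             v = matrix[j][i]
--             if 0 <= v <= 9:
--                 s.add(v)
--         colsets.append(s)
--     return [len(colsets[c] | colsets[c + 1] | colsets[c + 2]) == 9
--             for c in range(ncols - 2)]
-- ===== Notes on version B (the rewrite author's own statement) =====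
-- stated objective: alternative
-- what changed: B precomputes one set of in-range digits per column and answers each window as the size of the union of three column sets, instead of rebuilding a dict from all nine cells of every window; rows 0-2 are covered by one uniform column loop instead of an unrolled first window plus a separate loop.
import Mathlib
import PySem

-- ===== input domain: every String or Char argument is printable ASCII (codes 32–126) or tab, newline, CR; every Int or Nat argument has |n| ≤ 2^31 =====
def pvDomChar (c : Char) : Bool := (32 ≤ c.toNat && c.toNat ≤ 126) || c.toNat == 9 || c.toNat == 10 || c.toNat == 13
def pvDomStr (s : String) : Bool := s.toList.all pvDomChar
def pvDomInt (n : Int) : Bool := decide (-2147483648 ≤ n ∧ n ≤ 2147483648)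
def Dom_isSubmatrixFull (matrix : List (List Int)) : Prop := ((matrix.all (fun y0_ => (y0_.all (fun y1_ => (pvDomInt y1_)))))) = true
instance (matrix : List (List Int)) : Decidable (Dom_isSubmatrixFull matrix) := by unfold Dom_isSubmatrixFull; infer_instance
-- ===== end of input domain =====

-- B precomputes, once per column, the set of its in-range digits and answers each window
-- by the size of a union of three column sets, instead of rebuilding a dict from all nine
-- cells of every window (objective: alternative decomposition, same asymptotic cost).

-- ===== PORT A =====
def isSubmatrixFull (matrix : List (List Int)) : List Bool :=
  let dict0 : PySem.Dict Int Int :=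
    (PySem.List.pyRange 0 3 1).foldl (fun d i =>
      (PySem.List.pyRange 0 3 1).foldl (fun d j =>
        if ¬ (PySem.List.pyGetD (PySem.List.pyGetD matrix j []) i 0 < 0 ∨
              PySem.List.pyGetD (PySem.List.pyGetD matrix j []) i 0 > 9) then
          d.insert (PySem.List.pyGetD (PySem.List.pyGetD matrix j []) i 0) 1
        else d) d) PySem.Dict.empty
  let ans : List Bool := if dict0.size = 9 then [true] else [false]
  (PySem.List.pyRange 1 (PySem.List.len (PySem.List.pyGetD matrix 0 []) - 2) 1).foldl
    (fun ans iter =>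
      let dict : PySem.Dict Int Int :=
        (PySem.List.pyRange iter (iter + 3) 1).foldl (fun d i =>
          (PySem.List.pyRange 0 3 1).foldl (fun d j =>
            if ¬ (PySem.List.pyGetD (PySem.List.pyGetD matrix j []) i 0 < 0 ∨
                  PySem.List.pyGetD (PySem.List.pyGetD matrix j []) i 0 > 9) then
              d.insert (PySem.List.pyGetD (PySem.List.pyGetD matrix j []) i 0) 1
            else d) d) PySem.Dict.empty
      if dict.size = 9 then ans ++ [true] else ans ++ [false]) ans

-- ===== PORT B =====
def isSubmatrixFull_alt (matrix : List (List Int)) : List Bool :=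
  let ncols : Int := PySem.List.len (PySem.List.pyGetD matrix 0 [])
  let colsets : List (PySem.Set Int) :=
    (PySem.List.pyRange 0 ncols 1).foldl (fun cs i =>
      cs ++ [(PySem.List.pyRange 0 3 1).foldl (fun s j =>
        let v := PySem.List.pyGetD (PySem.List.pyGetD matrix j []) i 0
        if 0 ≤ v ∧ v ≤ 9 then PySem.Set.add s v else s) PySem.Set.empty]) []
  (PySem.List.pyRange 0 (ncols - 2) 1).map (fun c =>
    decide (PySem.Set.len (PySem.Set.union (PySem.Set.union
      (PySem.List.pyGetD colsets c PySem.Set.empty)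
      (PySem.List.pyGetD colsets (c + 1) PySem.Set.empty))
      (PySem.List.pyGetD colsets (c + 2) PySem.Set.empty)) = 9))

-- ===== PRECONDITION & SPEC =====
-- Pre_ excludes exactly the inputs on which the Python A raises IndexError: it needs at
-- least 3 rows, row 0 at least 3 columns, and rows 0..2 at least len(matrix[0]) columns.
def Pre_isSubmatrixFull (matrix : List (List Int)) : Prop :=
  3 ≤ matrix.length ∧ 3 ≤ (matrix.getD 0 []).length ∧
    ∀ r ∈ matrix.take 3, (matrix.getD 0 []).length ≤ r.length
instance (matrix : List (List Int)) : Decidable (Pre_isSubmatrixFull matrix) := by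
  unfold Pre_isSubmatrixFull; infer_instance
def pvWitness_isSubmatrixFull : List (List Int) := [[1,2,3],[4,5,6],[7,8,9]]
def Spec_isSubmatrixFull (matrix : List (List Int)) (out : List Bool) : Prop := out = isSubmatrixFull_alt matrix
instance (matrix : List (List Int)) (out : List Bool) : Decidable (Spec_isSubmatrixFull matrix out) := by unfold Spec_isSubmatrixFull; infer_instance

-- ===== CLAIM (what is proved, stated in full; the proofs are below) =====
def Claim_equal_isSubmatrixFull : Prop := ∀ (matrix : List (List Int)), Dom_isSubmatrixFull matrix → Pre_isSubmatrixFull matrix → Spec_isSubmatrixFull matrix (isSubmatrixFull matrix)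

-- ===== LEMMAS AND PROOFS =====

def pvCell (matrix : List (List Int)) (j i : Int) : Int :=
  PySem.List.pyGetD (PySem.List.pyGetD matrix j []) i 0

-- the dict A builds for the window whose leftmost column is c
def pvDictWin (matrix : List (List Int)) (c : Int) : PySem.Dict Int Int :=
  (PySem.List.pyRange c (c + 3) 1).foldl (fun d i =>
    (PySem.List.pyRange 0 3 1).foldl (fun d j =>
      if ¬ (pvCell matrix j i < 0 ∨ pvCell matrix j i > 9) then
        d.insert (pvCell matrix j i) 1
      else d) d) PySem.Dict.empty

-- the set B builds for column i
def pvColSet (matrix : List (List Int)) (i : Int) : PySem.Set Int :=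
  (PySem.List.pyRange 0 3 1).foldl (fun s j =>
    if 0 ≤ pvCell matrix j i ∧ pvCell matrix j i ≤ 9 then PySem.Set.add s (pvCell matrix j i)
    else s) PySem.Set.empty

-- the in-range cells of column i, top to bottom
def pvColKeys (matrix : List (List Int)) (i : Int) : List Int :=
  ((PySem.List.pyRange 0 3 1).filter
      (fun j => decide (¬ (pvCell matrix j i < 0 ∨ pvCell matrix j i > 9)))).map
    (fun j => pvCell matrix j i)

lemma pvRange3 (c : Int) : PySem.List.pyRange c (c + 3) 1 = [c, c + 1, c + 2] := by
  rw [PySem.List.pyRange_one]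
  have h : (c + 3 - c).toNat = 3 := by omega
  rw [h]
  simp [List.range_succ]

lemma pv_update_add (s t : PySem.Set Int) (x : Int) :
    PySem.Set.update s (PySem.Set.add t x) = PySem.Set.add (PySem.Set.update s t) x := by
  by_cases hx : x ∈ t
  · have h1 : PySem.Set.add t x = t := by
      simp [PySem.Set.add, hx]
    have h2 : PySem.Set.add (PySem.Set.update s t) x = PySem.Set.update s t := by
      simp [PySem.Set.add, hx]
    rw [h1, h2]
  · have h1 : PySem.Set.add t x = t ++ [x] := by
      simp [PySem.Set.add, hx]
    rw [h1, PySem.Set.update_append]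
    rfl

lemma pv_update_update (l : List Int) (s t : PySem.Set Int) :
    PySem.Set.update s (PySem.Set.update t l) = PySem.Set.update (PySem.Set.update s t) l := by
  induction l generalizing s t with
  | nil => rfl
  | cons x l ih =>
      show PySem.Set.update s (PySem.Set.update (PySem.Set.add t x) l)
          = PySem.Set.update (PySem.Set.add (PySem.Set.update s t) x) l
      rw [ih, pv_update_add]

lemma pv_update_nil (l : List Int) :
    PySem.Set.update ([] : PySem.Set Int) l = PySem.Set.ofList l :=
  (PySem.Set.ofList_eq_foldl l).symm

lemma pv_union_eq_update (s : PySem.Set Int) (l : List Int) :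
    PySem.Set.union s (PySem.Set.ofList l) = PySem.Set.update s l := by
  show PySem.Set.update s (PySem.Set.ofList l) = PySem.Set.update s l
  rw [PySem.Set.ofList_eq_foldl]
  exact pv_update_update l s []

lemma pv_ofList_append (a b : List Int) :
    PySem.Set.ofList (a ++ b) = PySem.Set.update (PySem.Set.ofList a) b := by
  rw [PySem.Set.ofList_eq_foldl, PySem.Set.ofList_eq_foldl, List.foldl_append]
  rfl

lemma pvF_keys (matrix : List (List Int)) (i : Int) (d : PySem.Dict Int Int) :
    ((PySem.List.pyRange 0 3 1).foldl (fun d j =>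
        if ¬ (pvCell matrix j i < 0 ∨ pvCell matrix j i > 9) then
          d.insert (pvCell matrix j i) 1
        else d) d).keys
      = PySem.Set.update d.keys (pvColKeys matrix i) := by
  have h1 := PySem.List.foldl_ite_eq_foldl_filter
      (p := fun j => ¬ (pvCell matrix j i < 0 ∨ pvCell matrix j i > 9))
      (f := fun (d : PySem.Dict Int Int) j => d.insert (pvCell matrix j i) 1)
      (PySem.List.pyRange 0 3 1) d
  beta_reduce at h1
  rw [h1]
  have h2 := PySem.Dict.keys_foldl_insert_key
      ((PySem.List.pyRange 0 3 1).filter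
        (fun j => decide (¬ (pvCell matrix j i < 0 ∨ pvCell matrix j i > 9))))
      (fun j => pvCell matrix j i) (fun _ _ => (1 : Int)) d
  beta_reduce at h2
  rw [h2]
  rfl

lemma pvDictWin_keys (matrix : List (List Int)) (c : Int) :
    (pvDictWin matrix c).keys
      = PySem.Set.ofList (pvColKeys matrix c ++ pvColKeys matrix (c + 1) ++ pvColKeys matrix (c + 2)) := by
  unfold pvDictWin
  rw [pvRange3]
  simp only [List.foldl_cons, List.foldl_nil]
  rw [pvF_keys, pvF_keys, pvF_keys, PySem.Dict.keys_empty]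
  rw [pv_ofList_append, pv_ofList_append, pv_update_nil]

lemma pvColSet_eq (matrix : List (List Int)) (i : Int) :
    pvColSet matrix i = PySem.Set.ofList (pvColKeys matrix i) := by
  unfold pvColSet pvColKeys
  have h1 := PySem.List.foldl_ite_eq_foldl_filter
      (p := fun j => 0 ≤ pvCell matrix j i ∧ pvCell matrix j i ≤ 9)
      (f := fun (s : PySem.Set Int) j => PySem.Set.add s (pvCell matrix j i))
      (PySem.List.pyRange 0 3 1) PySem.Set.empty
  beta_reduce at h1
  rw [h1]
  have hfilter : (PySem.List.pyRange 0 3 1).filter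
        (fun j => decide (0 ≤ pvCell matrix j i ∧ pvCell matrix j i ≤ 9))
      = (PySem.List.pyRange 0 3 1).filter
        (fun j => decide (¬ (pvCell matrix j i < 0 ∨ pvCell matrix j i > 9))) := by
    apply List.filter_congr
    intro j _
    simp only [decide_eq_decide]
    omega
  rw [hfilter]
  simp only [PySem.Set.empty]
  have h2 := PySem.Set.update_map_eq_foldl_add
      ((PySem.List.pyRange 0 3 1).filter
        (fun j => decide (¬ (pvCell matrix j i < 0 ∨ pvCell matrix j i > 9))))
      (fun j => pvCell matrix j i) ([] : PySem.Set Int)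
  beta_reduce at h2
  rw [← h2, pv_update_nil]

lemma pv_if_append (ans : List Bool) (t : Prop) [Decidable t] :
    (if t then ans ++ [true] else ans ++ [false]) = ans ++ [decide t] := by
  by_cases h : t <;> simp [h]

-- the per-window booleans of the two programs agree (for every c)
lemma pvWindow_eq (matrix : List (List Int)) (c : Int) :
    decide ((pvDictWin matrix c).size = 9)
      = decide (PySem.Set.len (PySem.Set.union (PySem.Set.union
          (pvColSet matrix c) (pvColSet matrix (c + 1))) (pvColSet matrix (c + 2))) = 9) := by
  have hsz : (pvDictWin matrix c).size = (pvDictWin matrix c).keys.length := by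
    simp [PySem.Dict.size, PySem.Dict.keys]
  have hB : PySem.Set.union (PySem.Set.union (pvColSet matrix c) (pvColSet matrix (c + 1)))
        (pvColSet matrix (c + 2))
      = PySem.Set.ofList (pvColKeys matrix c ++ pvColKeys matrix (c + 1) ++ pvColKeys matrix (c + 2)) := by
    rw [pvColSet_eq, pvColSet_eq, pvColSet_eq]
    rw [pv_union_eq_update, pv_union_eq_update]
    rw [pv_ofList_append, pv_ofList_append]
  rw [hB, hsz, pvDictWin_keys]
  simp only [PySem.Set.len, decide_eq_decide]
  omega

-- A's result, in closed map form
lemma pvA_shape (matrix : List (List Int)) :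
    isSubmatrixFull matrix
      = [decide ((pvDictWin matrix 0).size = 9)]
        ++ (PySem.List.pyRange 1 (PySem.List.len (PySem.List.pyGetD matrix 0 []) - 2) 1).map
            (fun c => decide ((pvDictWin matrix c).size = 9)) := by
  simp only [isSubmatrixFull, pv_if_append]
  rw [PySem.List.foldl_append_singleton_eq_map]
  have h1 : (if (pvDictWin matrix 0).size = 9 then [true] else [false])
      = [decide ((pvDictWin matrix 0).size = 9)] := by
    by_cases h : (pvDictWin matrix 0).size = 9 <;> simp [h]
  exact congr (congrArg (· ++ ·) h1) (List.map_congr_left fun a _ => rfl)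

-- B's result, in closed map form
lemma pvB_shape (matrix : List (List Int)) :
    isSubmatrixFull_alt matrix
      = (PySem.List.pyRange 0 (PySem.List.len (PySem.List.pyGetD matrix 0 []) - 2) 1).map
          (fun c => decide (PySem.Set.len (PySem.Set.union (PySem.Set.union
              (pvColSet matrix c) (pvColSet matrix (c + 1))) (pvColSet matrix (c + 2))) = 9)) := by
  simp only [isSubmatrixFull_alt]
  have hcs := PySem.List.foldl_append_singleton_eq_map
      (f := fun (i : Int) =>
        (PySem.List.pyRange 0 3 1).foldl (fun s j =>
          if 0 ≤ PySem.List.pyGetD (PySem.List.pyGetD matrix j []) i 0 ∧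
             PySem.List.pyGetD (PySem.List.pyGetD matrix j []) i 0 ≤ 9 then
            PySem.Set.add s (PySem.List.pyGetD (PySem.List.pyGetD matrix j []) i 0)
          else s) PySem.Set.empty)
      (l := PySem.List.pyRange 0 (PySem.List.len (PySem.List.pyGetD matrix 0 [])) 1)
      (acc := ([] : List (PySem.Set Int)))
  beta_reduce at hcs
  rw [hcs]
  simp only [List.nil_append]
  apply List.map_congr_left
  intro c hc
  obtain ⟨hc0, hc2⟩ := PySem.List.mem_pyRange_one.mp hc
  have hU : ∀ k : Int, 0 ≤ k → k < PySem.List.len (PySem.List.pyGetD matrix 0 []) →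
      PySem.List.pyGetD ((PySem.List.pyRange 0 (PySem.List.len (PySem.List.pyGetD matrix 0 [])) 1).map
          (fun (i : Int) =>
            (PySem.List.pyRange 0 3 1).foldl (fun s j =>
              if 0 ≤ PySem.List.pyGetD (PySem.List.pyGetD matrix j []) i 0 ∧
                 PySem.List.pyGetD (PySem.List.pyGetD matrix j []) i 0 ≤ 9 then
                PySem.Set.add s (PySem.List.pyGetD (PySem.List.pyGetD matrix j []) i 0)
              else s) PySem.Set.empty)) k PySem.Set.empty
        = pvColSet matrix k := by
    intro k hk0 hk1
    exact (PySem.List.pyGetD_map_pyRange_of_nonneg _ _ _ _ hk0 hk1).trans rfl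
  refine decide_eq_decide.mpr ?_
  rw [hU c (by omega) (by omega), hU (c + 1) (by omega) (by omega),
      hU (c + 2) (by omega) (by omega)]

-- ===== VERDICT (by name: the statement is the Claim_ definition above) =====
theorem isSubmatrixFull_spec : Claim_equal_isSubmatrixFull := by
  intro matrix _ hpre
  obtain ⟨hrows, hcols, hlen⟩ := hpre
  unfold Spec_isSubmatrixFull
  rw [pvA_shape, pvB_shape]
  have hn : (0 : Int) < PySem.List.len (PySem.List.pyGetD matrix 0 []) - 2 := by
    have : PySem.List.pyGetD matrix 0 [] = matrix.getD 0 [] := by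
      simp [PySem.List.pyGetD_zero]
    rw [this, PySem.List.len_eq]
    omega
  rw [PySem.List.pyRange_one_cons hn, List.map_cons]
  rw [pvWindow_eq matrix 0]
  rw [List.singleton_append]
  exact congrArg (List.cons _) (List.map_congr_left fun a _ => pvWindow_eq matrix a)
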